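-- pv_equiv track=rewrite | github.com/Xandynhu/LeetCode | Medium/minimum-number-of-operations-to-move-all-balls-to-each-box-v1.py | foo
-- ===== SOURCE A (Python) =====
-- def foo(boxes: str) -> list:
--
--     # define an empty array to return
--     output = []
--
--     # define the quantity of loops
--     end = len(boxes)
--
--     # for all positions in boxes
--     for i in range(end):
--
--         # define a variable to count how many operations we need to do
--         operations = 0
--
--         # for all other positions
--         for j in range(end):
--             if boxes[j] == "1":
--                 operations += abs(i - j)
--
--         output.append(operations)
--
--     return output
-- ===== SOURCE B (Python) =====
-- def foo(boxes: str) -> list: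
--     # Two-pass prefix scan: O(n) instead of A's O(n^2) nested loops.
--     left = []
--     cnt = 0
--     ops = 0
--     for c in boxes:
--         left.append(ops)
--         cnt += c == "1"
--         ops += cnt
--     right = []
--     cnt = 0
--     ops = 0
--     for c in reversed(boxes):
--         right.append(ops)
--         cnt += c == "1"
--         ops += cnt
--     right.reverse()
--     return [a + b for a, b in zip(left, right)]
-- ===== Notes on version B (the rewrite author's own statement) =====
-- stated objective: faster
-- what changed: Replaced the nested distance loops by two linear prefix scans (running count of '1's and running operation total, once left-to-right and once right-to-left) combined pointwise.
import Mathlib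
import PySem

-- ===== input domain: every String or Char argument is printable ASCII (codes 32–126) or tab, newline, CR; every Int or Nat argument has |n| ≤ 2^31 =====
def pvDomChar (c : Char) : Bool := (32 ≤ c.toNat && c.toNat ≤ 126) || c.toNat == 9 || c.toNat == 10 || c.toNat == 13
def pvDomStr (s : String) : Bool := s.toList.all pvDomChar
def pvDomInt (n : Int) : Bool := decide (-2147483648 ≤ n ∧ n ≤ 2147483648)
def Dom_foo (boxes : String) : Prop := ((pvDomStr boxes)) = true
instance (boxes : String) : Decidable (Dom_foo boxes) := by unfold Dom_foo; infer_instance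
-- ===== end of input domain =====

-- B replaces A's quadratic nested distance loops by two linear prefix scans, combined pointwise (objective: faster).

-- ===== PORT A =====
-- literal transliteration of A: for each i, an inner loop sums abs(i-j) over the '1' positions
def foo (boxes : String) : List Int :=
  let «end» : Int := PySem.Str.len boxes
  (PySem.List.pyRange 0 «end» 1).foldl
    (fun output i =>
      let operations : Int :=
        (PySem.List.pyRange 0 «end» 1).foldl
          (fun operations j =>
            if PySem.Str.pyGet? boxes j = some '1' then operations + |i - j| else operations)
          0
      output ++ [operations])
    []

-- ===== PORT B =====
-- one forward scan of Source B: emits the running operation total, then updates count and total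
def fooScan : List Char → Int → Int → List Int
  | [], _, _ => []
  | c :: rest, cnt, ops =>
    let cnt' := cnt + (if c = '1' then 1 else 0)
    ops :: fooScan rest cnt' (ops + cnt')

def foo_alt (boxes : String) : List Int :=
  List.zipWith (· + ·) (fooScan boxes.toList 0 0) ((fooScan boxes.toList.reverse 0 0).reverse)

-- ===== PRECONDITION & SPEC =====
def Spec_foo (boxes : String) (out : List Int) : Prop := out = foo_alt boxes
instance (boxes : String) (out : List Int) : Decidable (Spec_foo boxes out) := by unfold Spec_foo; infer_instance

-- ===== CLAIM (what is proved, stated in full; the proofs are below) =====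
def Claim_equal_foo : Prop := ∀ (boxes : String), Dom_foo boxes → Spec_foo boxes (foo boxes)

-- ===== LEMMAS AND PROOFS =====

-- indicator: 1 if position j of cs holds '1'
def fooB (cs : List Char) (j : Nat) : Int := if cs[j]? = some '1' then 1 else 0

-- total cost of moving the '1's among the first i boxes to box i
def fooG (cs : List Char) (i : Nat) : Int := ∑ j ∈ Finset.range i, ((i : Int) - (j : Int)) * fooB cs j

-- A's value at box i
def fooF (cs : List Char) (i : Nat) : Int := ∑ j ∈ Finset.range cs.length, |(i : Int) - (j : Int)| * fooB cs j

lemma fooSum_map_range (n : Nat) (f : Nat → Int) :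
    ((List.range n).map f).sum = ∑ j ∈ Finset.range n, f j := rfl

lemma fooZipWith_map {α : Type} (l : List α) (f g : α → Int) :
    List.zipWith (· + ·) (l.map f) (l.map g) = l.map (fun x => f x + g x) := by
  induction l with
  | nil => rfl
  | cons a t ih => simp [ih]

lemma fooReverse_map_range (n : Nat) (F : Nat → Int) :
    ((List.range n).map F).reverse = (List.range n).map (fun i => F (n - 1 - i)) := by
  apply List.ext_getElem
  · simp
  · intro i h1 h2
    simp only [List.length_map, List.length_range] at h1 h2
    simp only [List.getElem_reverse, List.getElem_map, List.getElem_range,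
      List.length_map, List.length_range]

lemma fooG_zero (cs : List Char) : fooG cs 0 = 0 := by simp [fooG]

lemma fooB_cons_succ (c : Char) (rest : List Char) (j : Nat) :
    fooB (c :: rest) (j + 1) = fooB rest j := by simp [fooB]

lemma fooG_succ_cons (c : Char) (rest : List Char) (i : Nat) :
    fooG (c :: rest) (i + 1) = fooG rest i + ((i : Int) + 1) * fooB (c :: rest) 0 := by
  unfold fooG
  rw [Finset.sum_range_succ']
  congr 1
  apply Finset.sum_congr rfl
  intro j hj
  rw [fooB_cons_succ]
  push_cast
  ring

lemma fooScan_eq (cs : List Char) : ∀ cnt ops : Int,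
    fooScan cs cnt ops = (List.range cs.length).map (fun (i : Nat) => ops + (i : Int) * cnt + fooG cs i) := by
  induction cs with
  | nil => intro cnt ops; simp [fooScan]
  | cons c rest ih =>
    intro cnt ops
    simp only [fooScan, ih, List.length_cons, List.range_succ_eq_map, List.map_cons,
      List.map_map]
    refine List.cons_eq_cons.mpr ⟨?_, ?_⟩
    · simp [fooG_zero]
    · apply List.map_congr_left
      intro i _
      simp only [Function.comp_apply, Nat.succ_eq_add_one, fooG_succ_cons]
      have hb : fooB (c :: rest) 0 = (if c = '1' then 1 else 0) := by
        simp [fooB]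
      rw [hb]
      push_cast
      ring

lemma fooB_reverse (cs : List Char) (j : Nat) (hj : j < cs.length) :
    fooB cs.reverse j = fooB cs (cs.length - 1 - j) := by
  unfold fooB
  rw [List.getElem?_reverse hj]

lemma fooKey (cs : List Char) (i : Nat) (hi : i < cs.length) :
    fooF cs i = fooG cs i + fooG cs.reverse (cs.length - 1 - i) := by
  set n := cs.length with hn
  set m := n - 1 - i with hm
  have hsplit : n = (i + 1) + m := by omega
  unfold fooF fooG
  rw [← hn, hsplit, Finset.sum_range_add]
  congr 1
  · -- left part: boxes 0..i
    rw [Finset.sum_range_succ]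
    have h0 : |(i : Int) - (i : Int)| * fooB cs i = 0 := by simp
    rw [h0, add_zero]
    apply Finset.sum_congr rfl
    intro j hj
    rw [Finset.mem_range] at hj
    rw [abs_of_nonneg (by omega : (0 : Int) ≤ (i : Int) - (j : Int))]
  · -- right part: boxes i+1..n-1, written through the reversed list
    have hL : ∑ x ∈ Finset.range m, |(i : Int) - ((i + 1 + x : Nat) : Int)| * fooB cs (i + 1 + x)
        = ∑ j ∈ Finset.range m, ((j : Int) + 1) * fooB cs (i + 1 + j) := by
      apply Finset.sum_congr rfl
      intro j hj
      have h3 : |(i : Int) - ((i + 1 + j : Nat) : Int)| = (j : Int) + 1 := by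
        rw [abs_sub_comm, abs_of_nonneg (by push_cast; omega)]
        push_cast; ring
      rw [h3]
    rw [hL, ← Finset.sum_range_reflect (fun j => ((j : Int) + 1) * fooB cs (i + 1 + j)) m]
    apply Finset.sum_congr rfl
    intro j hj
    rw [Finset.mem_range] at hj
    rw [fooB_reverse cs j (by omega)]
    have h1 : i + 1 + (m - 1 - j) = n - 1 - j := by omega
    have h2 : ((m - 1 - j : Nat) : Int) + 1 = (m : Int) - (j : Int) := by omega
    rw [h1, h2]

lemma foo_eq_map (boxes : String) :
    foo boxes = (List.range boxes.toList.length).map (fun k => fooF boxes.toList k) := by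
  unfold foo
  rw [PySem.List.foldl_append_singleton_eq_map, List.nil_append]
  rw [PySem.List.pyRange_one]
  simp only [sub_zero, zero_add, List.map_map]
  have hlen : (PySem.Str.len boxes).toNat = boxes.toList.length := by
    simp [PySem.Str.len]
  rw [hlen]
  apply List.map_congr_left
  intro k hk
  simp only [Function.comp_apply]
  -- inner loop → sum (the pyRange here was already rewritten above, same term)
  rw [List.foldl_map]
  have hfun : (fun (ops : Int) (j : Nat) =>
        if PySem.Str.pyGet? boxes (j : Int) = some '1' then ops + |(k : Int) - (j : Int)| else ops)
      = fun (ops : Int) (j : Nat) =>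
        ops + (if boxes.toList[j]? = some '1' then |(k : Int) - (j : Int)| else 0) := by
    funext ops j
    simp only [PySem.Str.pyGet?_natCast]
    split_ifs <;> simp
  rw [hfun, PySem.List.foldl_add, zero_add, fooSum_map_range]
  unfold fooF fooB
  apply Finset.sum_congr rfl
  intro j hj
  split_ifs <;> simp

lemma foo_alt_eq_map (boxes : String) :
    foo_alt boxes = (List.range boxes.toList.length).map
      (fun i => fooG boxes.toList i + fooG boxes.toList.reverse (boxes.toList.length - 1 - i)) := by
  unfold foo_alt
  rw [fooScan_eq, fooScan_eq]
  simp only [List.length_reverse, zero_add, mul_zero, add_zero]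
  rw [fooReverse_map_range, fooZipWith_map]

-- ===== VERDICT (by name: the statement is the Claim_ definition above) =====
theorem foo_spec : Claim_equal_foo := by
  intro boxes _
  unfold Spec_foo
  rw [foo_eq_map, foo_alt_eq_map]
  apply List.map_congr_left
  intro i hi
  rw [List.mem_range] at hi
  exact fooKey boxes.toList i hi
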